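-- pv_equiv track=rewrite | github.com/kronenthaler/AdventOfCode | 2024/day19.py | part1
-- ===== SOURCE A (Python) =====
-- import functools
--
-- def part1(towels, designs):
--     @functools.cache
--     def bt(target):
--         if len(target) == 0:
--             return 1
--         for t in towels:
--             if target.startswith(t) and bt(target[len(t):]):
--                 return 1
--         return 0
--
--     return sum([bt(d) for d in designs])
-- ===== SOURCE B (Python) =====
-- def part1(towels, designs):
--     # index towels by first character: only towels that can start at position i are tried
--     groups = {}
--     for t in towels:
--         if t:
--             groups.setdefault(t[0], []).append(t)
--
--     def formable(d):
--         n = len(d)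
--         dp = [False] * (n + 1)
--         dp[0] = True
--         for i in range(n):
--             if dp[i]:
--                 for t in groups.get(d[i], []):
--                     if d.startswith(t, i):
--                         dp[i + len(t)] = True
--         return dp[n]
--
--     memo = {}
--     total = 0
--     for d in designs:
--         if d not in memo:
--             memo[d] = formable(d)
--         if memo[d]:
--             total += 1
--     return total
-- ===== Notes on version B (the rewrite author's own statement) =====
-- stated objective: alternative
-- what changed: Replaces the memoized top-down suffix recursion with backtracking over towels by an iterative forward position-sweep DP over cut positions, with towels pre-indexed by first character and a per-design memo table.
-- outside the precondition, e.g. on part1(('a', ''), ['a']): A returns 1, B returns 1; on part1(('',), ['ab']): A raises RecursionError, B returns 0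
import Mathlib
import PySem

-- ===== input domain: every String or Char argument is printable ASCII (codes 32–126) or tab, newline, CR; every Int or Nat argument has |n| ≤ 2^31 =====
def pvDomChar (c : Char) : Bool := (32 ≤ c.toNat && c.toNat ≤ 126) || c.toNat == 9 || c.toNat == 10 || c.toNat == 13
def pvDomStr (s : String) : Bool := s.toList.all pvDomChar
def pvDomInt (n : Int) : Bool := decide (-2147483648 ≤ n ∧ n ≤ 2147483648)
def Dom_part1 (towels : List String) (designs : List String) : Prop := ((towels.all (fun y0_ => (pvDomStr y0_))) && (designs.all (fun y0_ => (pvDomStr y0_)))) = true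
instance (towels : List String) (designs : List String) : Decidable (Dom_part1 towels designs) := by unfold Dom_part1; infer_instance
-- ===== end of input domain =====

-- B replaces A's memoized top-down suffix recursion by an iterative forward position-sweep DP
-- (boolean reachability array over cut positions); equal return value on Pre_ (no empty towel).

-- ===== PORT A =====
-- the towel loop of bt: `for t in towels: if target.startswith(t) and bt(target[len(t):]): return 1` / `return 0`
def btLoop (ts : List (List Char)) (target : List Char) (rec : List Char → Int) : Int :=
  match ts with
  | [] => 0
  | t :: rest =>
    if t.isPrefixOf target && (rec (target.drop t.length) != 0) then 1
    else btLoop rest target rec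

-- bt; Python memoizes, which does not change the value. `fuel` makes the recursion structural:
-- on Pre_ (no empty towel) each call strictly shrinks the target, so fuel = |target|+1 is never exhausted.
def btA (ts : List (List Char)) : Nat → List Char → Int
  | 0, _ => 0
  | fuel+1, target =>
    if target.length = 0 then 1
    else btLoop ts target (btA ts fuel)

def part1 (towels : List String) (designs : List String) : Int :=
  (designs.map (fun d => btA (towels.map String.toList) (d.toList.length + 1) d.toList)).sum

-- ===== PORT B =====
-- `groups = {}; for t in towels: if t: groups.setdefault(t[0], []).append(t)`
def buildGroups (ts : List (List Char)) : PySem.Dict Char (List (List Char)) :=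
  ts.foldl (fun g t => if t = [] then g else g.modify (t.headD ' ') [] (· ++ [t])) PySem.Dict.empty

-- the inner towel loop: `for t in <towel list>: if d.startswith(t, i): dp[i + len(t)] = True`
def setFold (l : List (List Char)) (d : List Char) (i : Nat) (dp : List Bool) : List Bool :=
  l.foldl (fun dp2 t => if t.isPrefixOf (d.drop i) then dp2.set (i + t.length) true else dp2) dp

-- `for t in groups.get(d[i], []): …`  (i < len(d) in every call, so d[i] is d.getD i ' ')
def dpInner (groups : PySem.Dict Char (List (List Char))) (d : List Char) (i : Nat)
    (dp : List Bool) : List Bool :=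
  setFold (groups.getD (d.getD i ' ') []) d i dp

-- `dp = [False]*(n+1); dp[0] = True; for i in range(n): if dp[i]: <inner loop>`
def dpSweep (groups : PySem.Dict Char (List (List Char))) (d : List Char) : List Bool :=
  (List.range d.length).foldl
    (fun dp i => if dp.getD i false then dpInner groups d i dp else dp)
    ((List.replicate (d.length + 1) false).set 0 true)

def formableB (groups : PySem.Dict Char (List (List Char))) (d : List Char) : Bool :=
  (dpSweep groups d).getD d.length false

-- `memo = {}; total = 0; for d in designs: if d not in memo: memo[d] = formable(d); if memo[d]: total += 1`
def part1_alt (towels : List String) (designs : List String) : Int :=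
  let groups := buildGroups (towels.map String.toList)
  (designs.foldl
    (fun st d =>
      let memo := if st.1.contains d then st.1 else st.1.insert d (formableB groups d.toList)
      (memo, if memo.getD d false then st.2 + 1 else st.2))
    ((PySem.Dict.empty : PySem.Dict String Bool), (0 : Int))).2

-- ===== PRECONDITION & SPEC =====
-- Pre_ excludes inputs where "" is a towel AND some design is nonempty: there Python A's bt
-- recurses on an unchanged target and usually raises RecursionError (it returns only when an
-- earlier towel happens to succeed first, an accident of the search order).
def Pre_part1 (towels : List String) (designs : List String) : Prop :=
  "" ∉ towels ∨ designs.all (fun d => d = "") = true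
instance (towels : List String) (designs : List String) : Decidable (Pre_part1 towels designs) := by
  unfold Pre_part1; infer_instance

def pvWitness_part1 : List String × List String := (["a", "bc"], ["abc", "b", ""])

def Spec_part1 (towels : List String) (designs : List String) (out : Int) : Prop := out = part1_alt towels designs
instance (towels : List String) (designs : List String) (out : Int) : Decidable (Spec_part1 towels designs out) := by unfold Spec_part1; infer_instance

-- ===== CLAIM (what is proved, stated in full; the proofs are below) =====
def Claim_equal_part1 : Prop := ∀ (towels : List String) (designs : List String), Dom_part1 towels designs → Pre_part1 towels designs → Spec_part1 towels designs (part1 towels designs)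

-- ===== LEMMAS AND PROOFS =====

-- `target` is a concatenation of towels
inductive Decomp (ts : List (List Char)) : List Char → Prop
  | nil : Decomp ts []
  | cons {t rest} : t ∈ ts → Decomp ts rest → Decomp ts (t ++ rest)

theorem decomp_append {ts : List (List Char)} {xs : List Char} (t : List Char)
    (ht : t ∈ ts) (h : Decomp ts xs) : Decomp ts (xs ++ t) := by
  induction h with
  | nil => simpa using Decomp.cons ht Decomp.nil
  | cons ht' _ ih => rw [List.append_assoc]; exact Decomp.cons ht' ih

theorem decomp_last {ts : List (List Char)} {xs : List Char} (h : Decomp ts xs) :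
    xs = [] ∨ ∃ ys t, t ∈ ts ∧ Decomp ts ys ∧ xs = ys ++ t := by
  induction h with
  | nil => exact Or.inl rfl
  | @cons t rest ht hrest ih =>
    right
    rcases ih with rfl | ⟨ys, t', ht', hys, rfl⟩
    · exact ⟨[], t, ht, Decomp.nil, by simp⟩
    · exact ⟨t ++ ys, t', ht', Decomp.cons ht hys, by simp⟩

theorem btLoop_zero_or_one (ts : List (List Char)) (target : List Char) (rec : List Char → Int) :
    btLoop ts target rec = 0 ∨ btLoop ts target rec = 1 := by
  induction ts with
  | nil => exact Or.inl rfl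
  | cons t rest ih => by_cases h : t.isPrefixOf target && (rec (target.drop t.length) != 0) <;>
      simp [btLoop, h, ih]

theorem btLoop_eq_one_iff (ts : List (List Char)) (target : List Char) (rec : List Char → Int) :
    btLoop ts target rec = 1 ↔
      ∃ t ∈ ts, t.isPrefixOf target = true ∧ rec (target.drop t.length) ≠ 0 := by
  induction ts with
  | nil => simp [btLoop]
  | cons t rest ih =>
    rw [show btLoop (t :: rest) target rec =
      if t.isPrefixOf target && (rec (target.drop t.length) != 0) then 1
      else btLoop rest target rec from rfl]
    by_cases h : t.isPrefixOf target && (rec (target.drop t.length) != 0)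
    · rw [if_pos h]
      simp only [Bool.and_eq_true, bne_iff_ne] at h
      exact ⟨fun _ => ⟨t, List.mem_cons_self, h.1, h.2⟩, fun _ => rfl⟩
    · have h' : ¬(t.isPrefixOf target = true ∧ rec (target.drop t.length) ≠ 0) := by
        rintro ⟨h1, h2⟩
        exact h (by simp [h1, h2])
      rw [if_neg h, ih]
      constructor
      · rintro ⟨u, hu, h1, h2⟩; exact ⟨u, List.mem_cons_of_mem _ hu, h1, h2⟩
      · rintro ⟨u, hu, h1, h2⟩
        rcases List.mem_cons.mp hu with rfl | hu
        · exact absurd ⟨h1, h2⟩ h'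
        · exact ⟨u, hu, h1, h2⟩

theorem btA_zero_or_one (ts : List (List Char)) (fuel : Nat) (target : List Char) :
    btA ts fuel target = 0 ∨ btA ts fuel target = 1 := by
  cases fuel with
  | zero => exact Or.inl rfl
  | succ n =>
    by_cases h : target.length = 0 <;> simp [btA, h, btLoop_zero_or_one]

theorem btA_eq_one_iff {ts : List (List Char)} (hts : [] ∉ ts) :
    ∀ (fuel : Nat) (target : List Char), target.length < fuel →
      (btA ts fuel target = 1 ↔ Decomp ts target) := by
  intro fuel
  induction fuel with
  | zero => intro target h; omega
  | succ n ih =>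
    intro target hlen
    by_cases h0 : target.length = 0
    · rw [List.length_eq_zero_iff] at h0
      subst h0
      simp [btA, Decomp.nil]
    · rw [show btA ts (n+1) target = btLoop ts target (btA ts n) by simp [btA, h0],
        btLoop_eq_one_iff]
      constructor
      · rintro ⟨t, ht, hpre, hrec⟩
        have htne : t ≠ [] := fun h => hts (h ▸ ht)
        have hpre' : t <+: target := List.isPrefixOf_iff_prefix.mp hpre
        have htlen : 1 ≤ t.length := by
          cases t with
          | nil => exact absurd rfl htne
          | cons _ _ => simp
        have hlt : (target.drop t.length).length < n := by
          have := hpre'.length_le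
          simp only [List.length_drop]; omega
        have hdec : Decomp ts (target.drop t.length) := by
          rcases btA_zero_or_one ts n (target.drop t.length) with h | h
          · exact absurd h hrec
          · exact (ih _ hlt).mp h
        obtain ⟨s, hs⟩ := hpre'
        rw [← hs, List.drop_left] at hdec
        rw [← hs]
        exact Decomp.cons ht hdec
      · intro hdec
        cases hdec with
        | nil => exact absurd rfl h0
        | @cons t rest ht hrest =>
          have htne : t ≠ [] := fun h => hts (h ▸ ht)
          have htlen : 1 ≤ t.length := by
            cases t with
            | nil => exact absurd rfl htne
            | cons _ _ => simp
          refine ⟨t, ht, List.isPrefixOf_iff_prefix.mpr ⟨rest, rfl⟩, ?_⟩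
          have hdrop : (t ++ rest).drop t.length = rest := by simp
          rw [hdrop]
          have hlt : rest.length < n := by
            have : (t ++ rest).length < n + 1 := hlen
            simp only [List.length_append] at this; omega
          rw [(ih _ hlt).mpr hrest]
          decide

-- reachability of cut position j using steps from positions < k
def Reach (ts : List (List Char)) (d : List Char) (k j : Nat) : Prop :=
  j = 0 ∨ ∃ i, i < k ∧ Decomp ts (d.take i) ∧
    ∃ t ∈ ts, t.isPrefixOf (d.drop i) = true ∧ i + t.length = j

theorem reach_iff_decomp {ts : List (List Char)} (hts : [] ∉ ts) (d : List Char)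
    {k j : Nat} (hjk : j ≤ k) (hkn : k ≤ d.length) :
    Reach ts d k j ↔ Decomp ts (d.take j) := by
  constructor
  · rintro (rfl | ⟨i, hik, hdec, t, ht, hpre, hij⟩)
    · simpa using Decomp.nil
    · have hpre' : t <+: d.drop i := List.isPrefixOf_iff_prefix.mp hpre
      have : d.take j = d.take i ++ t := by
        rw [← hij, List.take_add, ← List.prefix_iff_eq_take.mp hpre']
      rw [this]
      exact decomp_append t ht hdec
  · intro hdec
    rcases Nat.eq_zero_or_pos j with rfl | hj
    · exact Or.inl rfl
    · rcases decomp_last hdec with hnil | ⟨ys, t, ht, hys, heq⟩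
      · have : (d.take j).length = 0 := by rw [hnil]; rfl
        simp only [List.length_take] at this
        omega
      · right
        have htne : t ≠ [] := fun h => hts (h ▸ ht)
        have htlen : 1 ≤ t.length := by
          cases t with
          | nil => exact absurd rfl htne
          | cons _ _ => simp
        have hlenj : (d.take j).length = j := by simp; omega
        have hyslen : ys.length + t.length = j := by
          have := congrArg List.length heq
          simp only [List.length_append] at this
          omega
        refine ⟨ys.length, by omega, ?_, t, ht, ?_, by omega⟩
        · have : d.take ys.length = ys := by
            have h1 : (d.take j).take ys.length = ys := by
              rw [heq, List.take_left]
            rwa [List.take_take, min_eq_left (by omega)] at h1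
          rwa [this]
        · rw [List.isPrefixOf_iff_prefix]
          have h2 : (d.take j).drop ys.length = t := by
            rw [heq, List.drop_left]
          have h3 : d.drop ys.length = t ++ d.drop j := by
            conv_lhs => rw [← List.take_append_drop j d]
            rw [List.drop_append_of_le_length (by omega), h2]
          exact h3 ▸ ⟨d.drop j, rfl⟩

theorem setFold_length (l : List (List Char)) (d : List Char) (i : Nat) (dp : List Bool) :
    (setFold l d i dp).length = dp.length := by
  induction l generalizing dp with
  | nil => rfl
  | cons t rest ih =>
    rw [show setFold (t :: rest) d i dp = setFold rest d i
      (if t.isPrefixOf (d.drop i) then dp.set (i + t.length) true else dp) from rfl, ih]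
    by_cases h : t.isPrefixOf (d.drop i) <;> simp [h]

theorem getD_set_true (dp : List Bool) (k j : Nat) (hk : k < dp.length) :
    (dp.set k true).getD j false = if j = k then true else dp.getD j false := by
  by_cases h : j = k
  · subst h; simp [List.getD, List.getElem?_set, hk]
  · simp only [List.getD, List.getElem?_set]
    rw [if_neg (fun hh : k = j => h hh.symm), if_neg h]

theorem setFold_getD (d : List Char) (i : Nat) (hi : i ≤ d.length)
    (l : List (List Char)) (dp : List Bool) (hdp : dp.length = d.length + 1) (j : Nat) :
    ((setFold l d i dp).getD j false = true ↔ 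
      dp.getD j false = true ∨ ∃ t ∈ l, t.isPrefixOf (d.drop i) = true ∧ i + t.length = j) := by
  induction l generalizing dp with
  | nil => simp [setFold]
  | cons t rest ih =>
    simp only [setFold, List.foldl_cons]
    by_cases h : t.isPrefixOf (d.drop i)
    · have hpre : t <+: d.drop i := List.isPrefixOf_iff_prefix.mp h
      have hk : i + t.length < dp.length := by
        have := hpre.length_le
        simp only [List.length_drop] at this
        omega
      have := ih (dp.set (i + t.length) true) (by simp [hdp])
      rw [show setFold rest d i (dp.set (i + t.length) true) =
        (List.foldl (fun dp2 t => if t.isPrefixOf (d.drop i) = true then dp2.set (i + t.length) true else dp2) (dp.set (i + t.length) true) rest) from rfl] at this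
      rw [h]
      simp only [if_true]
      rw [show (List.foldl (fun dp2 t => if t.isPrefixOf (d.drop i) = true then dp2.set (i + t.length) true else dp2) (dp.set (i + t.length) true) rest) = setFold rest d i (dp.set (i + t.length) true) from rfl] at *
      rw [this, getD_set_true dp _ j hk]
      by_cases hj : j = i + t.length
      · constructor
        · intro _
          exact Or.inr ⟨t, List.mem_cons_self, h, hj.symm⟩
        · intro _
          exact Or.inl (by rw [if_pos hj])
      · simp only [hj, if_false]
        constructor
        · rintro (hh | ⟨u, hu, h1, h2⟩)
          · exact Or.inl hh
          · exact Or.inr ⟨u, List.mem_cons_of_mem _ hu, h1, h2⟩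
        · rintro (hh | ⟨u, hu, h1, h2⟩)
          · exact Or.inl hh
          · rcases List.mem_cons.mp hu with rfl | hu
            · omega
            · exact Or.inr ⟨u, hu, h1, h2⟩
    · rw [if_neg h]
      rw [show List.foldl (fun dp2 t => if t.isPrefixOf (d.drop i) = true then dp2.set (i + t.length) true else dp2) dp rest = setFold rest d i dp from rfl]
      rw [ih dp hdp]
      constructor
      · rintro (hh | ⟨u, hu, h1, h2⟩)
        · exact Or.inl hh
        · exact Or.inr ⟨u, List.mem_cons_of_mem _ hu, h1, h2⟩
      · rintro (hh | ⟨u, hu, h1, h2⟩)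
        · exact Or.inl hh
        · rcases List.mem_cons.mp hu with rfl | hu
          · exact absurd h1 (by simp [h])
          · exact Or.inr ⟨u, hu, h1, h2⟩

theorem getD_buildGroups (ts : List (List Char)) (c : Char) :
    ∀ g : PySem.Dict Char (List (List Char)),
      (ts.foldl (fun g t => if t = [] then g else g.modify (t.headD ' ') [] (· ++ [t])) g).getD c []
        = g.getD c [] ++ ts.filter (fun t => !t.isEmpty && (t.headD ' ' == c)) := by
  induction ts with
  | nil => intro g; simp
  | cons t rest ih =>
    intro g
    rw [List.foldl_cons]
    cases t with
    | nil =>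
      rw [if_pos rfl, ih]
      simp
    | cons a l =>
      rw [if_neg (by simp), ih, PySem.Dict.getD_modify]
      by_cases hc : a = c
      · subst hc
        rw [if_pos (show a = (a :: l).headD ' ' from rfl)]
        simp [List.filter_cons, List.append_assoc]
      · rw [if_neg (show ¬c = (a :: l).headD ' ' from fun hh => hc hh.symm)]
        simp [List.filter_cons, hc]

theorem mem_groups (ts : List (List Char)) (c : Char) (t : List Char) :
    t ∈ (buildGroups ts).getD c [] ↔ t ∈ ts ∧ t ≠ [] ∧ t.headD ' ' = c := by
  rw [show (buildGroups ts).getD c []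
      = (PySem.Dict.empty : PySem.Dict Char (List (List Char))).getD c []
        ++ ts.filter (fun t => !t.isEmpty && (t.headD ' ' == c))
    from getD_buildGroups ts c PySem.Dict.empty]
  rw [PySem.Dict.getD_empty, List.nil_append, List.mem_filter]
  simp [List.isEmpty_iff, and_assoc]

theorem group_exists_iff {ts : List (List Char)} (hts : [] ∉ ts) {d : List Char} {k j : Nat}
    (hk : k < d.length) :
    (∃ t ∈ (buildGroups ts).getD (d.getD k ' ') [],
        t.isPrefixOf (d.drop k) = true ∧ k + t.length = j)
      ↔ ∃ t ∈ ts, t.isPrefixOf (d.drop k) = true ∧ k + t.length = j := by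
  constructor
  · rintro ⟨t, ht, hpre, hij⟩
    exact ⟨t, ((mem_groups ts _ t).mp ht).1, hpre, hij⟩
  · rintro ⟨t, ht, hpre, hij⟩
    have htne : t ≠ [] := fun h => hts (h ▸ ht)
    obtain ⟨c₀, t', rfl⟩ : ∃ c₀ t', t = c₀ :: t' := by
      cases t with
      | nil => exact absurd rfl htne
      | cons a b => exact ⟨a, b, rfl⟩
    obtain ⟨s, hs⟩ := List.isPrefixOf_iff_prefix.mp hpre
    rw [List.drop_eq_getElem_cons hk, List.cons_append] at hs
    have hgdk : d.getD k ' ' = d[k] := by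
      simp [List.getD, List.getElem?_eq_getElem hk]
    have hc : c₀ = d[k] := by injection hs
    refine ⟨c₀ :: t', (mem_groups ts _ _).mpr ⟨ht, htne, ?_⟩, hpre, hij⟩
    rw [hgdk, ← hc]
    rfl

theorem sweep_inv {ts : List (List Char)} (hts : [] ∉ ts) (d : List Char) :
    ∀ k, k ≤ d.length →
      ((List.range k).foldl (fun dp i => if dp.getD i false then dpInner (buildGroups ts) d i dp else dp)
        ((List.replicate (d.length + 1) false).set 0 true)).length = d.length + 1 ∧
      (∀ j, ((List.range k).foldl (fun dp i => if dp.getD i false then dpInner (buildGroups ts) d i dp else dp)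
        ((List.replicate (d.length + 1) false).set 0 true)).getD j false = true ↔ Reach ts d k j) := by
  intro k
  induction k with
  | zero =>
    intro _
    rw [List.range_zero, List.foldl_nil]
    refine ⟨by simp, fun j => ?_⟩
    rw [getD_set_true _ 0 j (by simp)]
    simp only [Reach]
    by_cases hj : j = 0
    · simp [hj]
    · rw [if_neg hj]
      have hrep : (List.replicate (d.length + 1) false).getD j false = false := by
        simp only [List.getD, List.getElem?_replicate]
        split <;> rfl
      rw [hrep]
      constructor
      · intro h; exact absurd h (by simp)
      · rintro (rfl | ⟨i, hik, _⟩)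
        · exact absurd rfl hj
        · omega
  | succ k ih =>
    intro hk1
    have hk : k ≤ d.length := by omega
    obtain ⟨hlen, hgd⟩ := ih hk
    rw [List.range_succ, List.foldl_append, List.foldl_cons, List.foldl_nil]
    set dpk := (List.range k).foldl (fun dp i => if dp.getD i false then dpInner (buildGroups ts) d i dp else dp)
        ((List.replicate (d.length + 1) false).set 0 true) with hdpk
    by_cases hcur : dpk.getD k false
    · rw [if_pos hcur]
      have hkd : k < d.length := by omega
      have hdeck : Decomp ts (d.take k) :=
        (reach_iff_decomp hts d (le_refl k) hk).mp ((hgd k).mp hcur)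
      refine ⟨by rw [show dpInner (buildGroups ts) d k dpk
          = setFold ((buildGroups ts).getD (d.getD k ' ') []) d k dpk from rfl,
          setFold_length, hlen], fun j => ?_⟩
      rw [show dpInner (buildGroups ts) d k dpk
          = setFold ((buildGroups ts).getD (d.getD k ' ') []) d k dpk from rfl,
        setFold_getD d k hk _ dpk hlen j, hgd j]
      simp only [Reach]
      constructor
      · rintro (hr | hex)
        · rcases hr with rfl | ⟨i, hik, rest⟩
          · exact Or.inl rfl
          · exact Or.inr ⟨i, by omega, rest⟩
        · obtain ⟨t, ht, hpre, hij⟩ := (group_exists_iff hts hkd).mp hex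
          exact Or.inr ⟨k, by omega, hdeck, t, ht, hpre, hij⟩
      · rintro (rfl | ⟨i, hik, hdec, t, ht, hpre, hij⟩)
        · exact Or.inl (Or.inl rfl)
        · by_cases hik' : i < k
          · exact Or.inl (Or.inr ⟨i, hik', hdec, t, ht, hpre, hij⟩)
          · have hik2 : k = i := by omega
            subst hik2
            exact Or.inr ((group_exists_iff hts hkd).mpr ⟨t, ht, hpre, hij⟩)
    · rw [if_neg hcur]
      refine ⟨hlen, fun j => ?_⟩
      rw [hgd j]
      simp only [Reach]
      constructor
      · rintro (rfl | ⟨i, hik, rest⟩)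
        · exact Or.inl rfl
        · exact Or.inr ⟨i, by omega, rest⟩
      · rintro (rfl | ⟨i, hik, hdec, t, ht, hpre, hij⟩)
        · exact Or.inl rfl
        · by_cases hik' : i < k
          · exact Or.inr ⟨i, hik', hdec, t, ht, hpre, hij⟩
          · have hik2 : k = i := by omega
            subst hik2
            exact absurd ((hgd k).mpr ((reach_iff_decomp hts d (le_refl k) hk).mpr hdec))
              (by simpa using hcur)

theorem formableB_iff_decomp {ts : List (List Char)} (hts : [] ∉ ts) (d : List Char) :
    formableB (buildGroups ts) d = true ↔ Decomp ts d := by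
  obtain ⟨_, hgd⟩ := sweep_inv hts d d.length (le_refl _)
  unfold formableB dpSweep
  rw [hgd d.length, reach_iff_decomp hts d (le_refl _) (le_refl _), List.take_length]

theorem btA_eq_formable {ts : List (List Char)} (hts : [] ∉ ts) (d : List Char) :
    btA ts (d.length + 1) d = if formableB (buildGroups ts) d then 1 else 0 := by
  by_cases h : formableB (buildGroups ts) d
  · rw [if_pos h]
    exact (btA_eq_one_iff hts (d.length + 1) d (by omega)).mpr
      ((formableB_iff_decomp hts d).mp h)
  · rw [if_neg h]
    rcases btA_zero_or_one ts (d.length + 1) d with h0 | h1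
    · exact h0
    · exact absurd ((formableB_iff_decomp hts d).mpr
        ((btA_eq_one_iff hts (d.length + 1) d (by omega)).mp h1)) (by simpa using h)

theorem foldl_count_eq_sum (g : String → Bool) (l : List String) :
    ∀ acc : Int, l.foldl (fun a d => if g d then a + 1 else a) acc =
      acc + (l.map (fun d => if g d then (1 : Int) else 0)).sum := by
  induction l with
  | nil => intro acc; simp
  | cons d rest ih =>
    intro acc
    by_cases h : g d <;> simp [h, ih] <;> ring

theorem memo_fold (f : String → Bool) (l : List String) :
    ∀ (memo : PySem.Dict String Bool) (acc : Int),
      (∀ k v, memo.get? k = some v → v = f k) →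
      ((l.foldl
        (fun st d =>
          let m := if st.1.contains d then st.1 else st.1.insert d (f d)
          (m, if m.getD d false then st.2 + 1 else st.2))
        (memo, acc)).2 : Int)
      = l.foldl (fun a d => if f d then a + 1 else a) acc := by
  induction l with
  | nil => intro memo acc _; rfl
  | cons d rest ih =>
    intro memo acc hinv
    rw [List.foldl_cons, List.foldl_cons]
    have hm : (if memo.contains d then memo else memo.insert d (f d)).getD d false = f d := by
      by_cases hc : memo.contains d
      · rw [if_pos hc]
        rw [PySem.Dict.contains_eq_isSome_get?] at hc
        obtain ⟨v, hv⟩ := Option.isSome_iff_exists.mp hc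
        rw [PySem.Dict.getD_eq_get?_getD, hv, Option.getD_some]
        exact hinv d v hv
      · rw [if_neg hc, PySem.Dict.getD_insert_self]
    have hinv' : ∀ k v,
        (if memo.contains d then memo else memo.insert d (f d)).get? k = some v → v = f k := by
      by_cases hc : memo.contains d
      · rw [if_pos hc]; exact hinv
      · rw [if_neg hc]
        intro k v hkv
        rw [PySem.Dict.get?_insert] at hkv
        by_cases hkd : k = d
        · rw [if_pos hkd] at hkv
          rw [hkd]
          exact (Option.some_inj.mp hkv).symm
        · rw [if_neg hkd] at hkv
          exact hinv k v hkv
    simp only [hm]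
    exact ih _ _ hinv'

theorem toList_ne_nil_of_mem {towels : List String} (hpre : "" ∉ towels) :
    [] ∉ towels.map String.toList := by
  intro h
  obtain ⟨t, ht, htl⟩ := List.mem_map.mp h
  exact hpre (String.toList_eq_nil_iff.mp htl ▸ ht)

-- ===== VERDICT (by name: the statement is the Claim_ definition above) =====
theorem part1_spec : Claim_equal_part1 := by
  intro towels designs _ hpre
  simp only [Spec_part1, part1, part1_alt]
  rw [memo_fold (fun d => formableB (buildGroups (towels.map String.toList)) d.toList) designs
    PySem.Dict.empty 0
    (by intro k v h; rw [PySem.Dict.get?_empty] at h; cases h)]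
  rw [foldl_count_eq_sum, Int.zero_add]
  congr 1
  apply List.map_congr_left
  intro d hd
  rcases hpre with hnp | hall
  · exact btA_eq_formable (toList_ne_nil_of_mem hnp) d.toList
  · have hde : d = "" := by simpa using List.all_eq_true.mp hall d hd
    subst hde
    rfl
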